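-- pv_equiv track=rewrite | github.com/981377660LMT/algorithm-study | 6_tree/前缀树trie/字典序搜索/字典序遍历.py | genLexicalOrder1
-- ===== SOURCE A (Python) =====
-- from typing import Generator
--
-- def genLexicalOrder1(n: int) -> Generator[int, None, None]:
--     """字典序dfs遍历十叉树,生成[0,n]的整数"""
--
--     def dfs(cur: int) -> Generator[int, None, None]:
--         for i in range(10):
--             next = cur * 10 + i
--             if next == 0:
--                 continue
--             if next > n:
--                 continue
--             yield next
--             yield from dfs(next)
--
--     yield 0
--     yield from dfs(0)
-- ===== SOURCE B (Python) =====
-- from typing import Generator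
--
-- def genLexicalOrder1(n: int) -> Generator[int, None, None]:
--     """Iterative lexicographic traversal: yield 0, then repeatedly compute the
--     next number in lexicographic order (go deeper by *10, else climb and +1)."""
--     yield 0
--     cur = 1
--     while cur <= n:
--         yield cur
--         if cur * 10 <= n:
--             cur *= 10
--         else:
--             while cur % 10 == 9 or cur + 1 > n:
--                 cur //= 10
--             if cur == 0:
--                 break
--             cur += 1
-- ===== Notes on version B (the rewrite author's own statement) =====
-- stated objective: faster
-- what changed: replaces the recursive denary-tree DFS generator by an iterative successor loop that computes each next lexicographic number directly (multiply by ten to descend, strip trailing digits and step to advance), with no recursion and no per-node ten-way scan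
import Mathlib
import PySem

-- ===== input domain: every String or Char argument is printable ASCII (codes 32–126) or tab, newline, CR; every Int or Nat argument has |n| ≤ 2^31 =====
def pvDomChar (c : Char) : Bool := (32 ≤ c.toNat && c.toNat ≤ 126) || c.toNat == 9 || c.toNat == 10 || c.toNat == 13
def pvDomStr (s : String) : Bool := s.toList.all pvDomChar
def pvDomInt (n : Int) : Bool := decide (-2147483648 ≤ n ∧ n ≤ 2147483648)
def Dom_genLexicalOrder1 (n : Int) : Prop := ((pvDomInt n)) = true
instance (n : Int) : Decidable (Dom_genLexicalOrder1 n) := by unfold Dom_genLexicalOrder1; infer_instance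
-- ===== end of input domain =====

-- B replaces A's recursive denary-tree DFS generator by an iterative successor loop
-- (descend by a factor of ten, else strip trailing digits and step); measurably faster by a constant factor.


-- ===== PORT A =====
-- dfs(cur): for i in range(10): nxt = cur*10+i; skip if nxt == 0 or nxt > n; else yield nxt, recurse.
-- The Nat fuel only makes the recursion structural; fuel n.toNat+1 exceeds the real recursion
-- depth (cur strictly increases and stays ≤ n), proved by the stability lemma below.
def dfsAuxA (n : Int) : Nat → Int → List Int
  | 0, _ => []
  | k+1, cur =>
    (PySem.List.pyRange 0 10 1).foldl
      (fun acc i =>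
        let nxt := cur * 10 + i
        if nxt = 0 then acc
        else if nxt > n then acc
        else acc ++ (nxt :: dfsAuxA n k nxt))
      []

def genLexicalOrder1 (n : Int) : List Int := 0 :: dfsAuxA n (n.toNat + 1) 0

-- ===== PORT B =====
-- inner while of Source B: while cur % 10 == 9 or cur + 1 > n: cur //= 10
-- (the `c ≤ 0` branch is a totality guard only: Python reaches this loop with cur ≥ 1 and n ≥ 1,
-- where the loop stops at 0 at the latest)
def climbB (n c : Int) : Int :=
  if PySem.Int.mod c 10 = 9 ∨ c + 1 > n then
    if h : c ≤ 0 then c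
    else climbB n (PySem.Int.floordiv c 10)
  else c
termination_by c.toNat
decreasing_by
  have h10 : PySem.Int.floordiv c 10 = c / 10 := PySem.Int.floordiv_eq_ediv_of_pos (by norm_num)
  rw [h10]; omega

-- outer while of Source B: while cur <= n: yield cur; descend or climb-and-step, break on climb to 0.
-- The Nat fuel makes the loop structural; the loop yields one number per iteration and the
-- equivalence theorem shows fuel n.toNat is exactly enough.
def bloopB (n : Int) : Nat → Int → List Int
  | 0, _ => []
  | k+1, cur =>
    if cur ≤ n then
      cur ::
        (if cur * 10 ≤ n then bloopB n k (cur * 10)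
         else
           let c := climbB n cur
           if c = 0 then [] else bloopB n k (c + 1))
    else []

def genLexicalOrder1_alt (n : Int) : List Int := 0 :: bloopB n n.toNat 1

-- ===== PRECONDITION & SPEC =====
def Spec_genLexicalOrder1 (n : Int) (out : List Int) : Prop := out = genLexicalOrder1_alt n
instance (n : Int) (out : List Int) : Decidable (Spec_genLexicalOrder1 n out) := by unfold Spec_genLexicalOrder1; infer_instance

-- ===== CLAIM (what is proved, stated in full; the proofs are below) =====
def Claim_equal_genLexicalOrder1 : Prop := ∀ (n : Int), Dom_genLexicalOrder1 n → Spec_genLexicalOrder1 n (genLexicalOrder1 n)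

-- ===== LEMMAS AND PROOFS =====

-- the body of A's inner loop, as a flatMap piece
def pieceA (n : Int) (k : Nat) (cur i : Int) : List Int :=
  if cur * 10 + i = 0 then []
  else if cur * 10 + i > n then []
  else (cur * 10 + i) :: dfsAuxA n k (cur * 10 + i)

-- the sibling-suffix of A's inner loop, children i, i+1, ..., 9 of cur
def sibsA (n : Int) (k : Nat) (cur : Int) (i : Nat) : List Int :=
  if _h : i < 10 then pieceA n k cur i ++ sibsA n k cur (i + 1) else []
termination_by 10 - i

-- iterated `x // 10` (decimal-prefix extraction)
def strip : Nat → Int → Int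
  | 0, x => x
  | j+1, x => strip j (x / 10)

def pfx (c x : Int) : Prop := ∃ j : Nat, strip j x = c

theorem dfsA_succ (n : Int) (k : Nat) (cur : Int) :
    dfsAuxA n (k+1) cur = (PySem.List.pyRange 0 10 1).flatMap (pieceA n k cur) := by
  have hfun : (fun (acc : List Int) (i : Int) =>
      let nxt := cur * 10 + i
      if nxt = 0 then acc else if nxt > n then acc else acc ++ (nxt :: dfsAuxA n k nxt))
      = fun (acc : List Int) (i : Int) => acc ++ pieceA n k cur i := by
    funext acc i
    simp only [pieceA]
    split_ifs <;> simp
  show (PySem.List.pyRange 0 10 1).foldl _ [] = _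
  rw [hfun, PySem.List.foldl_append_eq_flatMap]
  simp

theorem flatMap_eq_sibs (n : Int) (k : Nat) (cur : Int) :
    ∀ (d i : Nat), i + d = 10 →
      (PySem.List.pyRange (i:Int) 10 1).flatMap (pieceA n k cur) = sibsA n k cur i := by
  intro d
  induction d with
  | zero =>
    intro i hi
    have : i = 10 := by omega
    subst this
    rw [PySem.List.pyRange_one_eq_nil (by norm_num)]
    rw [sibsA]
    simp
  | succ d ih =>
    intro i hi
    have hilt : i < 10 := by omega
    rw [PySem.List.pyRange_one_cons (by exact_mod_cast hilt)]
    rw [List.flatMap_cons]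
    rw [show ((i:Int) + 1) = ((i+1 : Nat) : Int) by push_cast; ring]
    rw [ih (i+1) (by omega)]
    conv_rhs => rw [sibsA]
    rw [dif_pos hilt]

theorem strip_succ' (j : Nat) (x : Int) : strip (j+1) x = (strip j x) / 10 := by
  induction j generalizing x with
  | zero => rfl
  | succ j ih => show strip (j+1) (x / 10) = _; rw [ih]; rfl

theorem strip_add (p d : Nat) (x : Int) : strip (p + d) x = strip d (strip p x) := by
  induction p generalizing x with
  | zero => simp [strip]
  | succ p ih =>
    rw [show p + 1 + d = (p + d) + 1 by omega]
    show strip (p + d) (x / 10) = strip d (strip p (x / 10))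
    exact ih (x / 10)

theorem strip_le (j : Nat) (x : Int) (hx : 0 ≤ x) : strip j x ≤ x := by
  induction j generalizing x with
  | zero => exact le_refl x
  | succ j ih =>
    have := ih (x / 10) (by omega)
    show strip j (x / 10) ≤ x
    omega

-- two distinct prefixes of the same x cannot lie within a factor of 10 of each other
theorem pfx_antichain {a b x : Int} (ha : 1 ≤ a) (hab : a < b) (hb : b < 10 * a)
    (hx : 0 ≤ x) (hpa : pfx a x) (hpb : pfx b x) : False := by
  obtain ⟨p, hp⟩ := hpa
  obtain ⟨q, hq⟩ := hpb
  by_cases h : p ≤ q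
  · -- b = strip (q-p) a ≤ a < b
    have hq' : strip (p + (q - p)) x = b := by rwa [show p + (q - p) = q by omega]
    rw [strip_add, hp] at hq'
    have : strip (q - p) a ≤ a := strip_le _ _ (by omega)
    omega
  · -- a = strip (p-q) b ≤ b / 10, so 10*a ≤ b
    have hp' : strip (q + (p - q)) x = a := by rwa [show q + (p - q) = p by omega]
    rw [strip_add, hq] at hp'
    have hd : p - q = (p - q - 1) + 1 := by omega
    rw [hd] at hp'
    rw [show strip ((p - q - 1) + 1) b = strip (p - q - 1) (b / 10) from rfl] at hp'
    have : strip (p - q - 1) (b / 10) ≤ b / 10 := strip_le _ _ (by omega)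
    have : a ≤ b / 10 := by rw [← hp']; exact this
    omega

-- membership bound for A's dfs output
theorem memA (n : Int) : ∀ (k : Nat) (cur x : Int), 0 ≤ cur → x ∈ dfsAuxA n k cur →
    cur < x ∧ x ≤ n ∧ pfx cur x := by
  intro k
  induction k with
  | zero => intro cur x _ hx; simp [dfsAuxA] at hx
  | succ k ih =>
    intro cur x hcur hx
    rw [dfsA_succ, List.mem_flatMap] at hx
    obtain ⟨i, hi, hpi⟩ := hx
    rw [PySem.List.mem_pyRange_one] at hi
    unfold pieceA at hpi
    split_ifs at hpi with h1 h2
    · simp at hpi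
    · simp at hpi
    · rcases List.mem_cons.mp hpi with rfl | hmem
      · refine ⟨by omega, by omega, ⟨1, ?_⟩⟩
        show (cur * 10 + i) / 10 = cur
        omega
      · obtain ⟨ha, hb, j, hj⟩ := ih (cur * 10 + i) x (by omega) hmem
        refine ⟨by omega, hb, ⟨j + 1, ?_⟩⟩
        rw [strip_succ', hj]
        omega

theorem nodupA (n : Int) : ∀ (k : Nat) (cur : Int), 0 ≤ cur → (dfsAuxA n k cur).Nodup := by
  intro k
  induction k with
  | zero => intro cur _; simp [dfsAuxA]
  | succ k ih =>
    intro cur hcur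
    rw [dfsA_succ, List.nodup_flatMap]
    constructor
    · intro i hi
      rw [PySem.List.mem_pyRange_one] at hi
      unfold pieceA
      split_ifs with h1 h2
      · exact List.nodup_nil
      · exact List.nodup_nil
      · refine List.nodup_cons.mpr ⟨fun hmem => ?_, ih _ (by omega)⟩
        have := (memA n k _ _ (by omega) hmem).1
        omega
    · refine List.Pairwise.imp_of_mem ?_ (PySem.List.pairwise_lt_pyRange_one 0 10)
      intro i j hi hj hij
      rw [PySem.List.mem_pyRange_one] at hi hj
      intro x hxi hxj
      unfold pieceA at hxi hxj
      split_ifs at hxi with h1i h2i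
      · simp at hxi
      · simp at hxi
      split_ifs at hxj with h1j h2j
      · simp at hxj
      · simp at hxj
      have hpxi : pfx (cur * 10 + i) x ∧ cur * 10 + i ≤ x := by
        rcases List.mem_cons.mp hxi with rfl | hmem
        · exact ⟨⟨0, rfl⟩, le_refl _⟩
        · have := memA n k _ _ (by omega) hmem
          exact ⟨this.2.2, by omega⟩
      have hpxj : pfx (cur * 10 + j) x := by
        rcases List.mem_cons.mp hxj with rfl | hmem
        · exact ⟨0, rfl⟩
        · exact (memA n k _ _ (by omega) hmem).2.2
      exact pfx_antichain (a := cur * 10 + i) (b := cur * 10 + j)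
        (by omega) (by omega) (by omega) (by omega) hpxi.1 hpxj
  

theorem lengthA_le (n : Int) (k : Nat) (hn : 0 ≤ n) : ((dfsAuxA n k 0).length : Int) ≤ n := by
  have hnd : (dfsAuxA n k 0).Nodup := nodupA n k 0 (le_refl 0)
  have hsub : (dfsAuxA n k 0).toFinset ⊆ Finset.Icc (1:Int) n := by
    intro x hx
    rw [List.mem_toFinset] at hx
    have := memA n k 0 x (le_refl 0) hx
    rw [Finset.mem_Icc]
    omega
  have hcard := Finset.card_le_card hsub
  rw [List.toFinset_card_of_nodup hnd, Int.card_Icc] at hcard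
  omega

-- computation lemmas for B's climb loop
theorem climb_id (n c : Int) (hm : PySem.Int.mod c 10 ≠ 9) (hn : c + 1 ≤ n) :
    climbB n c = c := by
  rw [climbB, if_neg]; push_neg; exact ⟨hm, by omega⟩

theorem climb_step (n c : Int) (h : PySem.Int.mod c 10 = 9 ∨ c + 1 > n) (hc : 1 ≤ c) :
    climbB n c = climbB n (PySem.Int.floordiv c 10) := by
  rw [climbB, if_pos h, dif_neg (by omega)]

theorem climb_zero (n : Int) (hn : 1 ≤ n) : climbB n 0 = 0 := by
  rw [climbB, if_neg]
  push_neg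
  constructor
  · rw [PySem.Int.mod_eq_emod_of_pos (by norm_num)]; decide
  · omega

-- once a child index overshoots n, the whole sibling suffix of A's loop is empty
theorem sibs_nil (n : Int) (f : Nat) (cur : Int) :
    ∀ (d i : Nat), i + d = 10 → n < cur * 10 + (i:Int) → sibsA n f cur i = [] := by
  intro d
  induction d with
  | zero =>
    intro i hi _
    rw [sibsA, dif_neg (by omega)]
  | succ d ih =>
    intro i hi hlt
    rw [sibsA, dif_pos (by omega)]
    have hp : pieceA n f cur i = [] := by
      unfold pieceA
      split_ifs with h1 h2 <;> rfl
    rw [hp, List.nil_append]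
    exact ih (i+1) (by omega) (by push_cast; omega)

-- B's loop consumes a whole sibling block of A's dfs, then climbs past the parent
theorem SL (n : Int) (f : Nat) (cur : Int) (hcur : 0 ≤ cur)
    (hf : ∀ j : Int, cur < j → j ≤ n → (n - j).toNat < f)
    (IH : ∀ cur', 1 ≤ cur' → cur' ≤ n → (n - cur').toNat < f → ∀ k,
      bloopB n ((dfsAuxA n f cur').length + 1 + k) cur'
        = (cur' :: dfsAuxA n f cur') ++
          (if climbB n cur' = 0 then [] else bloopB n k (climbB n cur' + 1))) :
    ∀ (d i : Nat), i + d = 10 → i < 10 → 1 ≤ cur * 10 + (i:Int) → cur * 10 + (i:Int) ≤ n →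
    ∀ k, bloopB n ((sibsA n f cur i).length + k) (cur * 10 + (i:Int))
      = sibsA n f cur i ++ (if climbB n cur = 0 then [] else bloopB n k (climbB n cur + 1)) := by
  intro d
  induction d with
  | zero => intro i hi hilt; omega
  | succ d ih =>
    intro i hi hilt h1 h2 k
    set nxt : Int := cur * 10 + (i:Int) with hnxt
    have hmod : PySem.Int.mod nxt 10 = (i:Int) := by
      rw [PySem.Int.mod_eq_emod_of_pos (a := nxt) (by norm_num)]
      omega
    have hsibs : sibsA n f cur i = pieceA n f cur i ++ sibsA n f cur (i+1) := by
      rw [sibsA, dif_pos hilt]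
    have hpiece : pieceA n f cur i = nxt :: dfsAuxA n f nxt := by
      unfold pieceA
      rw [if_neg (by omega), if_neg (by omega)]
    have hfuel : (n - nxt).toNat < f := hf nxt (by omega) h2
    have hIH := IH nxt (by omega) h2 hfuel ((sibsA n f cur (i+1)).length + k)
    have hlen : (sibsA n f cur i).length + k
        = (dfsAuxA n f nxt).length + 1 + ((sibsA n f cur (i+1)).length + k) := by
      rw [hsibs, hpiece]
      simp [List.length_append]
      omega
    rw [hlen, hIH]
    by_cases hlast : (i:Int) = 9 ∨ nxt + 1 > n
    · -- last sibling: the climb from nxt strips the last digit and continues from cur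
      have hstep : climbB n nxt = climbB n cur := by
        rw [climb_step n nxt (by rw [hmod]; omega) (by omega)]
        congr 1
        rw [PySem.Int.floordiv_eq_ediv_of_pos (a := nxt) (by norm_num)]
        omega
      have hnil : sibsA n f cur (i+1) = [] := by
        rcases hlast with h9 | hov
        · have : i = 9 := by omega
          subst this
          rw [sibsA, dif_neg (by omega)]
        · exact sibs_nil n f cur (10 - (i+1)) (i+1) (by omega) (by push_cast; omega)
      rw [hsibs, hpiece, hnil, hstep]
      simp
    · -- inner sibling: the climb is a no-op and B steps to the next sibling
      push_neg at hlast
      have hid : climbB n nxt = nxt := climb_id n nxt (by rw [hmod]; omega) (by omega)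
      rw [hid, if_neg (by omega)]
      have hnxt1 : nxt + 1 = cur * 10 + ((i+1 : Nat) : Int) := by push_cast; omega
      rw [hnxt1]
      rw [ih (i+1) (by omega) (by omega) (by push_cast; omega) (by push_cast; omega) k]
      rw [hsibs, hpiece]
      simp [List.append_assoc]

-- the main correspondence: B's loop walks A's dfs output, subtree by subtree
theorem mainML (n : Int) : ∀ (f : Nat) (cur : Int), 1 ≤ cur → cur ≤ n → (n - cur).toNat < f →
    ∀ k, bloopB n ((dfsAuxA n f cur).length + 1 + k) cur
      = (cur :: dfsAuxA n f cur) ++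
        (if climbB n cur = 0 then [] else bloopB n k (climbB n cur + 1)) := by
  intro f
  induction f using Nat.strong_induction_on with
  | _ f IH =>
    intro cur h1 h2 h3 k
    obtain ⟨f', rfl⟩ : ∃ f', f = f' + 1 := ⟨f - 1, by omega⟩
    have hds : dfsAuxA n (f'+1) cur = sibsA n f' cur 0 := by
      rw [dfsA_succ]
      simpa using flatMap_eq_sibs n f' cur 10 0 rfl
    have hf : ∀ j : Int, cur < j → j ≤ n → (n - j).toNat < f' := by
      intro j hj hjn; omega
    have hSL := SL n f' cur (by omega) hf (fun cur' a b c => IH f' (by omega) cur' a b c)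
    by_cases hb : cur * 10 ≤ n
    · have hs0 := hSL 10 0 rfl (by omega) (by push_cast; omega) (by push_cast; omega) k
      rw [hds]
      rw [show (sibsA n f' cur 0).length + 1 + k = ((sibsA n f' cur 0).length + k) + 1 by omega]
      rw [bloopB]
      rw [if_pos h2, if_pos hb]
      rw [show cur * 10 = cur * 10 + ((0:Nat):Int) by push_cast; ring]
      rw [hs0]
      simp
    · have hnil : sibsA n f' cur 0 = [] := sibs_nil n f' cur 10 0 rfl (by push_cast; omega)
      rw [hds, hnil]
      simp only [List.length_nil]
      rw [show 0 + 1 + k = k + 1 by omega]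
      rw [bloopB]
      rw [if_pos h2, if_neg hb]
      simp

-- ===== VERDICT (by name: the statement is the Claim_ definition above) =====
theorem genLexicalOrder1_spec : Claim_equal_genLexicalOrder1 := by
  intro n _
  show genLexicalOrder1 n = genLexicalOrder1_alt n
  unfold genLexicalOrder1 genLexicalOrder1_alt
  congr 1
  by_cases hn : n ≤ 0
  · have hK : n.toNat = 0 := by omega
    rw [hK]
    show dfsAuxA n (0+1) 0 = bloopB n 0 1
    rw [dfsA_succ]
    have hall : ∀ i ∈ PySem.List.pyRange 0 10 1, pieceA n 0 0 i = [] := by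
      intro i hi
      rw [PySem.List.mem_pyRange_one] at hi
      unfold pieceA
      split_ifs with a b
      · rfl
      · rfl
      · exfalso; omega
    rw [List.flatMap_eq_nil_iff.mpr hall]
    rfl
  · push_neg at hn
    set K := n.toNat with hKdef
    have hds : dfsAuxA n (K+1) 0 = sibsA n K 0 0 := by
      rw [dfsA_succ]
      simpa using flatMap_eq_sibs n K 0 10 0 rfl
    have hs01 : sibsA n K 0 0 = sibsA n K 0 1 := by
      rw [sibsA, dif_pos (by omega)]
      have hp0 : pieceA n K 0 ((0:Nat):Int) = [] := by
        unfold pieceA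
        rw [if_pos (by norm_num)]
      rw [hp0, List.nil_append]
    have hlen : ((sibsA n K 0 1).length : Int) ≤ n := by
      rw [← hs01, ← hds]
      exact lengthA_le n (K+1) (by omega)
    obtain ⟨k₀, hk₀⟩ : ∃ k₀, K = (sibsA n K 0 1).length + k₀ :=
      ⟨K - (sibsA n K 0 1).length, by omega⟩
    have hf : ∀ j : Int, (0:Int) < j → j ≤ n → (n - j).toNat < K := by
      intro j hj hjn; omega
    have hSL := SL n K 0 (le_refl 0) hf (fun cur' a b c => mainML n K cur' a b c)
      9 1 rfl (by omega) (by norm_num) (by push_cast; omega) k₀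
    rw [hds, hs01]
    conv_rhs => rw [hk₀, show (1:Int) = 0 * 10 + ((1:Nat):Int) by norm_num]
    rw [hSL, climb_zero n (by omega)]
    simp
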